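-- pv_equiv track=rewrite | github.com/AndreaSalati/circle-JEPA | scripts/eval_cellcycle_jepa.py | best_order
-- ===== SOURCE A (Python) =====
-- PHASE_ORDER = ["G1", "G1/S", "S", "G2", "G2/M", "M"]
--
-- def count_inversions(order: list, expected: list) -> int:
--     idx_map = {g: i for i, g in enumerate(expected)}
--     indices = [idx_map[g] for g in order if g in idx_map]
--     inv = 0
--     for i in range(len(indices)):
--         for j in range(i + 1, len(indices)):
--             if indices[i] > indices[j]:
--                 inv += 1
--     return inv
--
-- def best_order(phases_dict: dict, expected: list = PHASE_ORDER) -> tuple[list, int, int]: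
--     rotated = sorted(phases_dict, key=phases_dict.get)
--     best_inv = 10**9
--     best_rot = rotated
--     best_dir = 1
--     for _ in range(len(rotated)):
--         for direction, seq in [(1, rotated), (-1, rotated[::-1])]:
--             inv = count_inversions(seq, expected)
--             if inv < best_inv:
--                 best_inv = inv
--                 best_rot = seq
--                 best_dir = direction
--         rotated = rotated[1:] + [rotated[0]]
--         if best_inv == 0:
--             break
--     return best_rot, best_inv, best_dir
-- ===== SOURCE B (Python) =====
-- PHASE_ORDER = ["G1", "G1/S", "S", "G2", "G2/M", "M"]
--
-- def best_order(phases_dict: dict, expected: list = PHASE_ORDER) -> tuple[list, int, int]: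
--     rotated = sorted(phases_dict, key=phases_dict.get)
--     n = len(rotated)
--     idx_map = {g: i for i, g in enumerate(expected)}
--     vals = [idx_map[g] for g in rotated if g in idx_map]
--     # inversions of the base rotation and number of distinct-valued pairs (one pass)
--     inv = 0
--     dpairs = 0
--     for k, v in enumerate(vals):
--         for w in vals[k + 1:]:
--             if v > w:
--                 inv += 1
--             if v != w:
--                 dpairs += 1
--     best_inv, best_r, best_dir = 10**9, 0, 1
--     cur = inv
--     for r in range(n):
--         for direction, val in ((1, cur), (-1, dpairs - cur)):
--             if val < best_inv:
--                 best_inv, best_r, best_dir = val, r, direction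
--         g = rotated[r]
--         if g in idx_map:
--             v = idx_map[g]
--             cur += sum(1 for w in vals if w > v) - sum(1 for w in vals if w < v)
--     best_rot = rotated[best_r:] + rotated[:best_r]
--     if best_dir == -1:
--         best_rot = best_rot[::-1]
--     return best_rot, best_inv, best_dir
-- ===== Notes on version B (the rewrite author's own statement) =====
-- stated objective: faster
-- what changed: B counts inversions and distinct-value pairs of the base rotation once, then walks the rotations updating the inversion count incrementally (moving one element front-to-back changes it by #greater - #smaller) and derives each reversed order's count from the identity inv(reverse) = distinct_pairs - inv, reconstructing the best rotation only at the end, instead of recounting inversions from scratch for all 2n candidate sequences.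
import Mathlib
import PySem

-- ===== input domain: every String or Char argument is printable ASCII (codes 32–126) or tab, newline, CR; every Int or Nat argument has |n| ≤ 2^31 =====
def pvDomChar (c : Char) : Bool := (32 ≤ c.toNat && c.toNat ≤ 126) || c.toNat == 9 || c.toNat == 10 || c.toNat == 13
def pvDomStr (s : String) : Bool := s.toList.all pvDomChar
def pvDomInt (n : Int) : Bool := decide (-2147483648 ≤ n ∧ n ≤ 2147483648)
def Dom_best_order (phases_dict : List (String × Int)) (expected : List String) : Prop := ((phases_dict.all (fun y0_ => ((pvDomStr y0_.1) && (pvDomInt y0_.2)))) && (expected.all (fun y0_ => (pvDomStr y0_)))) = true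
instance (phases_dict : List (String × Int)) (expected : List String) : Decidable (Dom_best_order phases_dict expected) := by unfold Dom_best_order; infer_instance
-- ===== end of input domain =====

-- B replaces A's fresh O(n^2) inversion recount for all 2n candidate rotations/directions
-- by one base count plus O(n) incremental updates per rotation and the reversal identity
-- inv(reverse) = distinct_pairs - inv (objective: faster, O(n^3) -> O(n^2)).

-- ===== PORT A =====

-- {g: i for i, g in enumerate(expected)} ; [idx_map[g] for g in order if g in idx_map] ;
-- the nested range loop counting indices[i] > indices[j] (pyGetD is exact: i,j are in range).
def count_inversions (order : List String) (expected : List String) : Int :=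
  let idx_map : PySem.Dict String Int :=
    (PySem.List.enumerate expected).foldl (fun d p => d.insert p.2 p.1) PySem.Dict.empty
  let indices : List Int :=
    order.foldl (fun acc g => if idx_map.contains g then acc ++ [idx_map.getD g 0] else acc) []
  (PySem.List.pyRange 0 (indices.length : Int) 1).foldl (fun inv i =>
    (PySem.List.pyRange (i + 1) (indices.length : Int) 1).foldl (fun inv j =>
      if PySem.List.pyGetD indices j 0 < PySem.List.pyGetD indices i 0 then inv + 1 else inv) inv) 0

-- the 'for _ in range(len(rotated))' loop with its early 'break', as fuel recursion;
-- rotated[1:] + [rotated[0]] is drop 1 ++ take 1 (exact: the body only runs when rotated ≠ []).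
def bestLoopA (expected : List String) : Nat → List String → Int × List String × Int → Int × List String × Int
  | 0, _, best => best
  | Nat.succ k, rotated, (binv, brot, bdir) =>
    let inv1 := count_inversions rotated expected
    let (binv, brot, bdir) := if inv1 < binv then (inv1, rotated, (1 : Int)) else (binv, brot, bdir)
    let inv2 := count_inversions rotated.reverse expected
    let (binv, brot, bdir) := if inv2 < binv then (inv2, rotated.reverse, (-1 : Int)) else (binv, brot, bdir)
    let rotated' := rotated.drop 1 ++ rotated.take 1
    if binv = 0 then (binv, brot, bdir)
    else bestLoopA expected k rotated' (binv, brot, bdir)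

def best_order (phases_dict : List (String × Int)) (expected : List String) : List String × Int × Int :=
  let d : PySem.Dict String Int := PySem.Dict.ofList phases_dict
  let rotated := PySem.List.sorted d.keys (fun g => d.getD g 0) false
  let (binv, brot, bdir) := bestLoopA expected rotated.length rotated ((10 : Int) ^ 9, rotated, 1)
  (brot, binv, bdir)

-- ===== PORT B =====
def best_order_alt (phases_dict : List (String × Int)) (expected : List String) : List String × Int × Int :=
  let d : PySem.Dict String Int := PySem.Dict.ofList phases_dict
  let rotated := PySem.List.sorted d.keys (fun g => d.getD g 0) false
  let n := rotated.length
  let idx_map : PySem.Dict String Int :=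
    (PySem.List.enumerate expected).foldl (fun m p => m.insert p.2 p.1) PySem.Dict.empty
  let vals : List Int :=
    rotated.foldl (fun acc g => if idx_map.contains g then acc ++ [idx_map.getD g 0] else acc) []
  -- for k, v in enumerate(vals): for w in vals[k+1:]: count inversions and distinct pairs
  let (inv, dpairs) :=
    (PySem.List.enumerate vals).foldl (fun (s : Int × Int) p =>
      (PySem.List.slice vals (some (p.1 + 1)) none).foldl (fun (s : Int × Int) w =>
        (if w < p.2 then s.1 + 1 else s.1, if p.2 ≠ w then s.2 + 1 else s.2)) s) (0, 0)
  let st :=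
    (PySem.List.pyRange 0 (n : Int) 1).foldl (fun (st : Int × Int × Int × Int) r =>
      let (binv, br, bdir, cur) := st
      let (binv, br, bdir) := if cur < binv then (cur, r, (1 : Int)) else (binv, br, bdir)
      let (binv, br, bdir) := if dpairs - cur < binv then (dpairs - cur, r, (-1 : Int)) else (binv, br, bdir)
      let g := PySem.List.pyGetD rotated r ""
      let cur :=
        if idx_map.contains g then
          let v := idx_map.getD g 0
          cur + vals.foldl (fun a w => if v < w then a + 1 else a) 0
              - vals.foldl (fun a w => if w < v then a + 1 else a) 0
        else cur
      (binv, br, bdir, cur)) (((10 : Int) ^ 9, 0, 1, inv))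
  let (binv, br, bdir, _) := st
  let best_rot := PySem.List.slice rotated (some br) none ++ PySem.List.slice rotated none (some br)
  let best_rot := if bdir = -1 then best_rot.reverse else best_rot
  (best_rot, binv, bdir)

-- ===== PRECONDITION & SPEC =====
def Spec_best_order (phases_dict : List (String × Int)) (expected : List String) (out : List String × Int × Int) : Prop := out = best_order_alt phases_dict expected
instance (phases_dict : List (String × Int)) (expected : List String) (out : List String × Int × Int) : Decidable (Spec_best_order phases_dict expected out) := by unfold Spec_best_order; infer_instance

-- ===== CLAIM (what is proved, stated in full; the proofs are below) =====
def Claim_equal_best_order : Prop := ∀ (phases_dict : List (String × Int)) (expected : List String), Dom_best_order phases_dict expected → Spec_best_order phases_dict expected (best_order phases_dict expected)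

-- ===== LEMMAS AND PROOFS =====

-- ------- proof-side helper definitions -------

-- the idx_map dict built from `expected`
def idxD (expected : List String) : PySem.Dict String Int :=
  (PySem.List.enumerate expected).foldl (fun d p => d.insert p.2 p.1) PySem.Dict.empty

-- the filtered index list [idx_map[g] for g in l if g in idx_map]
def filtI (I : PySem.Dict String Int) (l : List String) : List Int :=
  (l.filter (fun g => I.contains g)).map (fun g => I.getD g 0)

-- canonical inversion count and distinct-pair count
def invN : List Int → Nat
  | [] => 0
  | v :: t => t.countP (fun w => decide (w < v)) + invN t

def dpN : List Int → Nat
  | [] => 0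
  | v :: t => t.countP (fun w => decide (v ≠ w)) + dpN t

-- the r-th rotation of S
def rotL (S : List String) (r : Nat) : List String := S.drop r ++ S.take r

-- inversion count of the r-th rotation, and total distinct pairs, as Int
def cInvF (I : PySem.Dict String Int) (S : List String) (r : Nat) : Int :=
  (invN (filtI I (rotL S r)) : Int)

def PDF (I : PySem.Dict String Int) (S : List String) : Int := (dpN (filtI I S) : Int)

-- the abstract "pick the better of (c, r, 1), (P - c, r, -1)" selection step and loop
def selStep (c P : Int) (r : Nat) (st : Int × Nat × Int) : Int × Nat × Int :=
  let (binv, br, bdir) := st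
  let (binv, br, bdir) := if c < binv then (c, r, (1 : Int)) else (binv, br, bdir)
  if P - c < binv then (P - c, r, (-1 : Int)) else (binv, br, bdir)

def selLoop (cf : Nat → Int) (P : Int) : Nat → Nat → Int × Nat × Int → Int × Nat × Int
  | 0, _, st => st
  | k + 1, r, st => selLoop cf P k (r + 1) (selStep (cf r) P r st)

-- the best rotation list described by (index, direction)
def mkRot (S : List String) (br : Nat) (bdir : Int) : List String :=
  if bdir = -1 then (rotL S br).reverse else rotL S br

-- B's main loop body, abstracted over its let-bound context
def stepB (I : PySem.Dict String Int) (S : List String) (vals : List Int) (dpairs : Int)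
    (st : Int × Int × Int × Int) (r : Int) : Int × Int × Int × Int :=
  let (binv, br, bdir, cur) := st
  let (binv, br, bdir) := if cur < binv then (cur, r, (1 : Int)) else (binv, br, bdir)
  let (binv, br, bdir) := if dpairs - cur < binv then (dpairs - cur, r, (-1 : Int)) else (binv, br, bdir)
  let g := PySem.List.pyGetD S r ""
  let cur :=
    if I.contains g then
      let v := I.getD g 0
      cur + vals.foldl (fun a w => if v < w then a + 1 else a) 0
          - vals.foldl (fun a w => if w < v then a + 1 else a) 0
    else cur
  (binv, br, bdir, cur)

-- the two cores (everything after the shared `rotated = sorted(...)` prefix)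
def aCore (E S : List String) : List String × Int × Int :=
  match bestLoopA E S.length S ((10 : Int) ^ 9, S, 1) with
  | (binv, brot, bdir) => (brot, binv, bdir)

def bCore (E S : List String) : List String × Int × Int :=
  let n := S.length
  let idx_map := idxD E
  let vals : List Int :=
    S.foldl (fun acc g => if idx_map.contains g then acc ++ [idx_map.getD g 0] else acc) []
  let (inv, dpairs) :=
    (PySem.List.enumerate vals).foldl (fun (s : Int × Int) p =>
      (PySem.List.slice vals (some (p.1 + 1)) none).foldl (fun (s : Int × Int) w =>
        (if w < p.2 then s.1 + 1 else s.1, if p.2 ≠ w then s.2 + 1 else s.2)) s) (0, 0)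
  let st := (PySem.List.pyRange 0 (n : Int) 1).foldl (stepB idx_map S vals dpairs) (((10 : Int) ^ 9, 0, 1, inv))
  let (binv, br, bdir, _) := st
  let best_rot := PySem.List.slice S (some br) none ++ PySem.List.slice S none (some br)
  let best_rot := if bdir = -1 then best_rot.reverse else best_rot
  (best_rot, binv, bdir)

-- ------- small arithmetic / list lemmas -------

theorem countP_lt_add_gt (v : Int) (t : List Int) :
    t.countP (fun w => decide (w < v)) + t.countP (fun w => decide (v < w))
      = t.countP (fun w => decide (v ≠ w)) := by
  induction t with
  | nil => simp
  | cons x t ih =>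
    simp only [List.countP_cons]
    rcases lt_trichotomy x v with h | h | h
    · rw [if_pos (by simpa using h), if_neg (by simpa using lt_asymm h),
        if_pos (by simpa using ne_of_gt h)]
      omega
    · subst h
      have h1 : ¬ (x < x) := lt_irrefl x
      have h2 : ¬ (x ≠ x) := fun hc => hc rfl
      simpa [h1, h2] using ih
    · rw [if_neg (by simpa using lt_asymm h), if_pos (by simpa using h),
        if_pos (by simpa using ne_of_lt h)]
      omega

theorem invN_append_singleton (l : List Int) (x : Int) :
    invN (l ++ [x]) = invN l + l.countP (fun w => decide (x < w)) := by
  induction l with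
  | nil => simp [invN]
  | cons v t ih =>
    simp only [List.cons_append, invN, ih, List.countP_append, List.countP_cons,
      List.countP_nil]
    omega

theorem dpN_perm {l l' : List Int} (h : l.Perm l') : dpN l = dpN l' := by
  induction h with
  | nil => rfl
  | cons x p ih => simp only [dpN, ih, p.countP_eq]
  | swap x y t =>
    by_cases hxy : x = y
    · subst hxy; rfl
    · simp only [dpN, List.countP_cons]
      rw [decide_eq_true (Ne.symm hxy), decide_eq_true hxy]
      omega
  | trans _ _ ih1 ih2 => exact ih1.trans ih2

theorem invN_reverse (l : List Int) : invN l.reverse + invN l = dpN l := by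
  induction l with
  | nil => rfl
  | cons x t ih =>
    simp only [List.reverse_cons, invN_append_singleton, invN, dpN, List.countP_reverse]
    have := countP_lt_add_gt x t
    omega

theorem invN_le_dpN (l : List Int) : invN l ≤ dpN l := by
  have := invN_reverse l; omega

-- ------- filtI lemmas -------

theorem filtI_append (I : PySem.Dict String Int) (a b : List String) :
    filtI I (a ++ b) = filtI I a ++ filtI I b := by
  simp [filtI]

theorem filtI_reverse (I : PySem.Dict String Int) (l : List String) :
    filtI I l.reverse = (filtI I l).reverse := by
  simp [filtI]

theorem filtI_perm (I : PySem.Dict String Int) {l l' : List String} (h : l.Perm l') :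
    (filtI I l).Perm (filtI I l') := (h.filter _).map _

theorem indices_eq (I : PySem.Dict String Int) (order : List String) :
    order.foldl (fun acc g => if I.contains g then acc ++ [I.getD g 0] else acc) []
      = filtI I order := by
  rw [PySem.List.foldl_append_if]
  simp [filtI]

-- ------- rotation lemmas -------

theorem rotL_zero (S : List String) : rotL S 0 = S := by simp [rotL]

theorem rotL_perm (S : List String) (r : Nat) : (rotL S r).Perm S := by
  rw [rotL]
  calc (S.drop r ++ S.take r).Perm (S.take r ++ S.drop r) := List.perm_append_comm
    _ = S := List.take_append_drop r S

theorem rotL_cons (S : List String) (r : Nat) (h : r < S.length) :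
    rotL S r = S[r] :: (S.drop (r + 1) ++ S.take r) := by
  rw [rotL, List.drop_eq_getElem_cons h, List.cons_append]

theorem rotL_succ (S : List String) (r : Nat) (h : r < S.length) :
    rotL S (r + 1) = (S.drop (r + 1) ++ S.take r) ++ [S[r]] := by
  rw [rotL, List.take_add_one, List.getElem?_eq_getElem h]
  simp

theorem rot_step (S : List String) (r : Nat) (h : r < S.length) :
    (rotL S r).drop 1 ++ (rotL S r).take 1 = rotL S (r + 1) := by
  rw [rotL_cons S r h, rotL_succ S r h]
  simp

-- ------- inversion counts of rotations -------

theorem cInvF_nonneg (I : PySem.Dict String Int) (S : List String) (r : Nat) :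
    0 ≤ cInvF I S r := Int.natCast_nonneg _

theorem dpN_rot (I : PySem.Dict String Int) (S : List String) (r : Nat) :
    dpN (filtI I (rotL S r)) = dpN (filtI I S) :=
  dpN_perm (filtI_perm I (rotL_perm S r))

theorem cInvF_le_PDF (I : PySem.Dict String Int) (S : List String) (r : Nat) :
    cInvF I S r ≤ PDF I S := by
  unfold cInvF PDF
  rw [← dpN_rot I S r]
  exact_mod_cast invN_le_dpN _

theorem cInvF_rev (I : PySem.Dict String Int) (S : List String) (r : Nat) :
    (invN (filtI I (rotL S r).reverse) : Int) = PDF I S - cInvF I S r := by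
  rw [filtI_reverse]
  have h := invN_reverse (filtI I (rotL S r))
  rw [dpN_rot I S r] at h
  unfold cInvF PDF
  omega

theorem cInvF_succ (I : PySem.Dict String Int) (S : List String) (r : Nat) (h : r < S.length) :
    cInvF I S (r + 1) =
      if I.contains S[r] then
        cInvF I S r + ((filtI I S).countP (fun w => decide (I.getD S[r] 0 < w)) : Int)
                    - ((filtI I S).countP (fun w => decide (w < I.getD S[r] 0)) : Int)
      else cInvF I S r := by
  have hperm : (filtI I (rotL S r)).Perm (filtI I S) := filtI_perm I (rotL_perm S r)
  have h1 : rotL S r = S[r] :: (S.drop (r + 1) ++ S.take r) := rotL_cons S r h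
  have h2 : rotL S (r + 1) = (S.drop (r + 1) ++ S.take r) ++ [S[r]] := rotL_succ S r h
  by_cases hc : I.contains S[r]
  · have hfg : filtI I (S[r] :: (S.drop (r + 1) ++ S.take r))
        = I.getD S[r] 0 :: filtI I (S.drop (r + 1) ++ S.take r) := by
      simp [filtI, hc]
    have hfg2 : filtI I ((S.drop (r + 1) ++ S.take r) ++ [S[r]])
        = filtI I (S.drop (r + 1) ++ S.take r) ++ [I.getD S[r] 0] := by
      rw [filtI_append]
      simp [filtI, hc]
    have e1 : invN (filtI I (rotL S r))
        = (filtI I (S.drop (r + 1) ++ S.take r)).countP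
            (fun w => decide (w < I.getD S[r] 0)) + invN (filtI I (S.drop (r + 1) ++ S.take r)) := by
      rw [h1, hfg]; rfl
    have e2 : invN (filtI I (rotL S (r + 1)))
        = invN (filtI I (S.drop (r + 1) ++ S.take r))
          + (filtI I (S.drop (r + 1) ++ S.take r)).countP
              (fun w => decide (I.getD S[r] 0 < w)) := by
      rw [h2, hfg2, invN_append_singleton]
    have c1 : (filtI I S).countP (fun w => decide (I.getD S[r] 0 < w))
        = (filtI I (S.drop (r + 1) ++ S.take r)).countP (fun w => decide (I.getD S[r] 0 < w)) := by
      rw [← hperm.countP_eq, h1, hfg, List.countP_cons]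
      simp
    have c2 : (filtI I S).countP (fun w => decide (w < I.getD S[r] 0))
        = (filtI I (S.drop (r + 1) ++ S.take r)).countP (fun w => decide (w < I.getD S[r] 0)) := by
      rw [← hperm.countP_eq, h1, hfg, List.countP_cons]
      simp
    rw [if_pos hc]
    unfold cInvF
    rw [e1, e2, c1, c2]
    push_cast
    ring
  · have hfg : filtI I (S[r] :: (S.drop (r + 1) ++ S.take r))
        = filtI I (S.drop (r + 1) ++ S.take r) := by
      simp [filtI, hc]
    have hfg2 : filtI I ((S.drop (r + 1) ++ S.take r) ++ [S[r]])
        = filtI I (S.drop (r + 1) ++ S.take r) := by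
      rw [filtI_append]
      simp [filtI, hc]
    rw [if_neg hc]
    unfold cInvF
    rw [h1, h2, hfg, hfg2]

-- ------- selection loop lemmas -------

theorem selLoop_steady (cf : Nat → Int) (P : Int)
    (hcf : ∀ r, 0 ≤ cf r ∧ cf r ≤ P) :
    ∀ k r (st : Int × Nat × Int), st.1 = 0 → selLoop cf P k r st = st := by
  intro k
  induction k with
  | zero => intro r st _; rfl
  | succ k ih =>
    intro r st h0
    obtain ⟨binv, br, bdir⟩ := st
    simp only at h0
    subst h0
    have h1 := (hcf r).1
    have h2 := (hcf r).2
    rw [selLoop, selStep]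
    simp only [if_neg (by omega : ¬ cf r < 0), if_neg (by omega : ¬ P - cf r < 0)]
    exact ih (r + 1) _ rfl

-- ------- count_inversions = invN ∘ filtI -------

theorem countP_pyRange_getD (m : List Int) (k : Nat) (q : Int → Bool) :
    (PySem.List.pyRange ((k : Int) + 1) (m.length : Int) 1).countP
        (fun j => q (PySem.List.pyGetD m j 0))
      = (m.drop (k + 1)).countP q := by
  rw [show ((k : Int) + 1) = ((k + 1 : Nat) : Int) from by push_cast; ring]
  have h := PySem.List.map_pyGetD_pyRange (xs := m) (a := ((k + 1 : Nat) : Int)) (d := 0)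
      (by exact_mod_cast Nat.zero_le _)
  simp only [Int.toNat_natCast] at h
  rw [← h, List.countP_map]
  rfl

theorem countP_pyRange_lt (m : List Int) (k : Nat) (v : Int) :
    (PySem.List.pyRange ((k : Int) + 1) (m.length : Int) 1).countP
        (fun j => decide (PySem.List.pyGetD m j 0 < v))
      = (m.drop (k + 1)).countP (fun w => decide (w < v)) :=
  countP_pyRange_getD m k (fun w => decide (w < v))

theorem sumInv_nat (m : List Int) :
    ((List.range m.length).map
        (fun k => (m.drop (k + 1)).countP (fun w => decide (w < m.getD k 0)))).sum
      = invN m := by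
  induction m with
  | nil => simp [invN]
  | cons v t ih =>
    simp only [List.length_cons, List.range_succ_eq_map, List.map_cons, List.map_map,
      List.sum_cons, Function.comp_def, List.drop_succ_cons, List.getD_cons_succ,
      List.getD_cons_zero, List.drop_zero]
    rw [ih]
    rfl

theorem count_inversions_eq (E order : List String) :
    count_inversions order E = (invN (filtI (idxD E) order) : Int) := by
  have hsum : ∀ (l : List Nat), ((l.map (fun n : Nat => (n : Int))).sum) = ((l.sum : Nat) : Int) := by
    intro l
    induction l with
    | nil => simp
    | cons x t ih =>
      rw [List.map_cons, List.sum_cons, List.sum_cons, ih]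
      push_cast
      ring
  simp only [count_inversions]
  rw [show ((PySem.List.enumerate E).foldl (fun d p => d.insert p.2 p.1) PySem.Dict.empty)
      = idxD E from rfl]
  rw [indices_eq (idxD E) order]
  set m := filtI (idxD E) order with hm
  simp only [PySem.List.foldl_ite_add_one]
  rw [PySem.List.foldl_add]
  rw [PySem.List.pyRange_one]
  simp only [Int.sub_zero, Int.toNat_natCast, List.map_map, Function.comp_def, zero_add,
    PySem.List.pyGetD_natCast]
  simp only [countP_pyRange_lt]
  rw [show (fun k : Nat => (((m.drop (k + 1)).countP (fun w => decide (w < m.getD k 0)) : Nat) : Int))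
      = ((fun n : Nat => (n : Int))
          ∘ (fun k : Nat => (m.drop (k + 1)).countP (fun w => decide (w < m.getD k 0)))) from rfl]
  rw [← List.map_map, hsum, sumInv_nat]

-- ------- A's loop = selLoop -------

theorem loopA_eq (E S : List String) :
    ∀ k r (binv : Int) (br : Nat) (bdir : Int), r + k = S.length →
      bestLoopA E k (rotL S r) (binv, mkRot S br bdir, bdir)
        = (match selLoop (cInvF (idxD E) S) (PDF (idxD E) S) k r (binv, br, bdir) with
           | (i, j, d) => (i, mkRot S j d, d)) := by
  intro k
  induction k with
  | zero => intro r binv br bdir h; rfl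
  | succ k ih =>
    intro r binv br bdir h
    have hr : r < S.length := by omega
    have hcf : ∀ j, 0 ≤ cInvF (idxD E) S j ∧ cInvF (idxD E) S j ≤ PDF (idxD E) S :=
      fun j => ⟨cInvF_nonneg _ _ _, cInvF_le_PDF _ _ _⟩
    have hm1 : rotL S r = mkRot S r 1 := by simp [mkRot]
    have hm2 : (rotL S r).reverse = mkRot S r (-1) := by simp [mkRot]
    simp only [bestLoopA, selLoop, selStep]
    rw [count_inversions_eq E (rotL S r),
        show (invN (filtI (idxD E) (rotL S r)) : Int) = cInvF (idxD E) S r from rfl,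
        count_inversions_eq E (rotL S r).reverse, cInvF_rev (idxD E) S r,
        rot_step S r hr]
    by_cases h1 : cInvF (idxD E) S r < binv
    · rw [if_pos h1, if_pos h1]
      try dsimp only
      by_cases h2 : PDF (idxD E) S - cInvF (idxD E) S r < cInvF (idxD E) S r
      · rw [if_pos h2, if_pos h2]
        try dsimp only
        by_cases h0 : PDF (idxD E) S - cInvF (idxD E) S r = 0
        · rw [if_pos h0, selLoop_steady _ _ hcf k (r + 1) _ h0]
          try dsimp only
          rw [hm2]
        · rw [if_neg h0, hm2, ih (r + 1) _ r (-1) (by omega)]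
      · rw [if_neg h2, if_neg h2]
        try dsimp only
        by_cases h0 : cInvF (idxD E) S r = 0
        · rw [if_pos h0, selLoop_steady _ _ hcf k (r + 1) _ h0]
          try dsimp only
          rw [hm1]
        · rw [if_neg h0, hm1, ih (r + 1) _ r 1 (by omega)]
    · rw [if_neg h1, if_neg h1]
      try dsimp only
      by_cases h2 : PDF (idxD E) S - cInvF (idxD E) S r < binv
      · rw [if_pos h2, if_pos h2]
        try dsimp only
        by_cases h0 : PDF (idxD E) S - cInvF (idxD E) S r = 0
        · rw [if_pos h0, selLoop_steady _ _ hcf k (r + 1) _ h0]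
          try dsimp only
          rw [hm2]
        · rw [if_neg h0, hm2, ih (r + 1) _ r (-1) (by omega)]
      · rw [if_neg h2, if_neg h2]
        try dsimp only
        by_cases h0 : binv = 0
        · rw [if_pos h0, selLoop_steady _ _ hcf k (r + 1) _ h0]
        · rw [if_neg h0, ih (r + 1) binv br bdir (by omega)]

-- ------- B's pair loop -------

theorem pairLoop (vals : List Int) :
    ∀ (xs : List Int) (s : Nat), vals.drop s = xs → ∀ (a b : Int),
      (PySem.List.enumerate xs (s : Int)).foldl (fun (st : Int × Int) p =>
          (PySem.List.slice vals (some (p.1 + 1)) none).foldl (fun (st : Int × Int) w =>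
            (if w < p.2 then st.1 + 1 else st.1, if p.2 ≠ w then st.2 + 1 else st.2)) st) (a, b)
        = (a + (invN xs : Int), b + (dpN xs : Int)) := by
  intro xs
  induction xs with
  | nil =>
    intro s h a b
    simp [PySem.List.enumerate_nil, invN, dpN]
  | cons x t ih =>
    intro s h a b
    have hdrop : vals.drop (s + 1) = t := by
      have h2 := congrArg (List.drop 1) h
      simpa [List.drop_drop, Nat.add_comm] using h2
    rw [PySem.List.enumerate_cons, List.foldl_cons]
    have hslice : PySem.List.slice vals (some ((s : Int) + 1)) none = t := by
      rw [show ((s : Int) + 1) = ((s + 1 : Nat) : Int) from by push_cast; ring,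
        PySem.List.slice_from_natCast, hdrop]
    dsimp only
    rw [hslice]
    rw [PySem.List.foldl_prod_mk (f := fun acc w => if w < x then acc + 1 else acc)
        (g := fun acc w => if x ≠ w then acc + 1 else acc)]
    rw [PySem.List.foldl_ite_add_one, PySem.List.foldl_ite_add_one]
    rw [show ((s : Int) + 1) = ((s + 1 : Nat) : Int) from by push_cast; ring]
    rw [ih (s + 1) hdrop]
    have hi : invN (x :: t) = t.countP (fun w => decide (w < x)) + invN t := rfl
    have hd : dpN (x :: t) = t.countP (fun w => decide (x ≠ w)) + dpN t := rfl
    rw [hi, hd]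
    push_cast
    simp [add_assoc]

-- ------- B's main loop = selLoop -------

theorem foldB_eq (I : PySem.Dict String Int) (S : List String) :
    ∀ k r (binv : Int) (br : Nat) (bdir : Int), r + k = S.length →
      (PySem.List.pyRange (r : Int) (S.length : Int) 1).foldl
          (stepB I S (filtI I S) (PDF I S)) (binv, (br : Int), bdir, cInvF I S r)
        = (match selLoop (cInvF I S) (PDF I S) k r (binv, br, bdir) with
           | (i, j, d) => (i, (j : Int), d, cInvF I S S.length)) := by
  intro k
  induction k with
  | zero =>
    intro r binv br bdir h
    have hr : r = S.length := by omega
    subst hr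
    rw [PySem.List.pyRange_one_eq_nil (le_refl _)]
    rfl
  | succ k ih =>
    intro r binv br bdir h
    have hr : r < S.length := by omega
    rw [PySem.List.pyRange_one_cons (by exact_mod_cast hr)]
    rw [List.foldl_cons]
    simp only [selLoop, stepB, selStep]
    have hg : PySem.List.pyGetD S (r : Int) "" = S[r] := by
      rw [PySem.List.pyGetD_natCast]
      exact List.getD_eq_getElem S "" hr
    rw [hg]
    rw [PySem.List.foldl_ite_add_one, PySem.List.foldl_ite_add_one]
    simp only [zero_add]
    rw [← cInvF_succ I S r hr]
    rw [show ((r : Int) + 1) = ((r + 1 : Nat) : Int) from by push_cast; ring]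
    by_cases h1 : cInvF I S r < binv
    · rw [if_pos h1, if_pos h1]
      try dsimp only
      by_cases h2 : PDF I S - cInvF I S r < cInvF I S r
      · rw [if_pos h2, if_pos h2]
        try dsimp only
        exact ih (r + 1) _ r (-1) (by omega)
      · rw [if_neg h2, if_neg h2]
        try dsimp only
        exact ih (r + 1) _ r 1 (by omega)
    · rw [if_neg h1, if_neg h1]
      try dsimp only
      by_cases h2 : PDF I S - cInvF I S r < binv
      · rw [if_pos h2, if_pos h2]
        try dsimp only
        exact ih (r + 1) _ r (-1) (by omega)
      · rw [if_neg h2, if_neg h2]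
        try dsimp only
        exact ih (r + 1) binv br bdir (by omega)

-- ------- the two cores agree -------

theorem core_eq (E S : List String) : aCore E S = bCore E S := by
  simp only [aCore, bCore]
  rw [indices_eq (idxD E) S]
  rw [show PySem.List.enumerate (filtI (idxD E) S) (0 : Int)
      = PySem.List.enumerate (filtI (idxD E) S) ((0 : Nat) : Int) from by norm_num]
  rw [pairLoop (filtI (idxD E) S) (filtI (idxD E) S) 0 (by simp) 0 0]
  simp only [zero_add]
  rw [show ((invN (filtI (idxD E) S)) : Int) = cInvF (idxD E) S 0 from by
    simp [cInvF, rotL_zero]]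
  rw [show ((dpN (filtI (idxD E) S)) : Int) = PDF (idxD E) S from rfl]
  have hB := foldB_eq (idxD E) S S.length 0 ((10 : Int) ^ 9) 0 1 (by omega)
  simp only [Nat.cast_zero] at hB
  rw [hB]
  have hA := loopA_eq E S S.length 0 ((10 : Int) ^ 9) 0 1 (by omega)
  have hmk : mkRot S 0 1 = S := by simp [mkRot, rotL_zero]
  rw [rotL_zero, hmk] at hA
  rw [hA]
  obtain ⟨i, j, d⟩ := selLoop (cInvF (idxD E) S) (PDF (idxD E) S) S.length 0 ((10 : Int) ^ 9, 0, 1)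
  dsimp only
  simp [mkRot, rotL, PySem.List.slice_from_natCast, PySem.List.slice_to_natCast]

theorem best_order_eq_aCore (pd : List (String × Int)) (E : List String) :
    best_order pd E
      = aCore E (PySem.List.sorted (PySem.Dict.ofList pd).keys
          (fun g => (PySem.Dict.ofList pd).getD g 0) false) := rfl

theorem best_order_alt_eq_bCore (pd : List (String × Int)) (E : List String) :
    best_order_alt pd E
      = bCore E (PySem.List.sorted (PySem.Dict.ofList pd).keys
          (fun g => (PySem.Dict.ofList pd).getD g 0) false) := rfl



-- ===== VERDICT (by name: the statement is the Claim_ definition above) =====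
theorem best_order_spec : Claim_equal_best_order := by
  intro pd E _
  unfold Spec_best_order
  rw [best_order_eq_aCore, best_order_alt_eq_bCore, core_eq]
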